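-- pv_equiv track=rewrite | github.com/BRUCE6/WSE2018 | assign1/ni/crawler.py | url_score
-- ===== SOURCE A (Python) =====
-- def url_score(query, url):
--     query_ws = query.lower().split()
--     url_score = 0
--     for w in query_ws:
--         if len(w) > 3:
--             # substring occurence, because plural nonus might be used
--             for j in range(3, len(w) + 1):
--                 if w[:j] in url.lower():
--                     url_score += 1
--         else:
--             if w in url.lower():
--                     url_score += 1
--     if url_score > len(query_ws):
--         return url_score
--     else:
--         return 0
-- ===== SOURCE B (Python) =====
-- def url_score(query, url):
--     ul = url.lower()
--     query_ws = query.lower().split()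
--     score = 0
--     for w in query_ws:
--         if len(w) > 3:
--             # prefix presence is monotone in j, so binary-search the longest matching prefix
--             if w[:3] in ul:
--                 lo, hi = 3, len(w)
--                 while lo < hi:
--                     mid = (lo + hi + 1) // 2
--                     if w[:mid] in ul:
--                         lo = mid
--                     else:
--                         hi = mid - 1
--                 score += lo - 2
--         else:
--             if w in ul:
--                 score += 1
--     return score if score > len(query_ws) else 0
-- ===== Notes on version B (the rewrite author's own statement) =====
-- stated objective: faster
-- what changed: A counts matching prefixes w[:3..len(w)] by testing every prefix against url.lower() (recomputed per test); B hoists url.lower() and binary-searches the longest matching prefix, exploiting that prefix presence in the url is monotone, so the count is longest-2.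
import Mathlib
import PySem

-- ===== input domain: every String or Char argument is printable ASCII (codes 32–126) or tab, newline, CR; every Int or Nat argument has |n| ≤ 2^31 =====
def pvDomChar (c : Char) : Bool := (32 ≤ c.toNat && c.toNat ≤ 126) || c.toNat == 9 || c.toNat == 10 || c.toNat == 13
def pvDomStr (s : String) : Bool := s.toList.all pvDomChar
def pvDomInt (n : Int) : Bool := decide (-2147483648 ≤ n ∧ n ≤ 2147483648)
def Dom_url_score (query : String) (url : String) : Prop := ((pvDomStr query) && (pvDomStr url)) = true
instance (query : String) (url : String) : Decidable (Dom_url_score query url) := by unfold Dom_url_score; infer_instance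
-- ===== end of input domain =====

-- B replaces A's linear scan over all prefixes w[:3], …, w[:len(w)] by a binary search for the
-- longest prefix present in url.lower() (prefix presence is monotone), and hoists url.lower().

-- ===== PORT A =====
def url_score (query : String) (url : String) : Int :=
  let query_ws := PySem.Str.split₀ (PySem.Str.lower query)
  let score := query_ws.foldl (fun acc w =>
    if 3 < PySem.Str.len w then
      (PySem.List.pyRange 3 (PySem.Str.len w + 1)).foldl (fun acc2 j =>
        if PySem.Str.isIn (PySem.Str.slice w none (some j)) (PySem.Str.lower url) then acc2 + 1
        else acc2) acc
    else
      if PySem.Str.isIn w (PySem.Str.lower url) then acc + 1 else acc) 0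
  if (query_ws.length : Int) < score then score else 0

-- ===== PORT B =====
-- termination lemma for the binary-search loop of B
lemma pvMidBounds {lo hi : Int} (h : lo < hi) :
    lo < PySem.Int.floordiv (lo + hi + 1) 2 ∧ PySem.Int.floordiv (lo + hi + 1) 2 ≤ hi := by
  rw [PySem.Int.floordiv_eq_ediv_of_pos (by norm_num : (0:Int) < 2)]
  omega

-- the while-loop of B: largest j in [lo, hi] whose prefix w[:j] occurs in ul (given w[:lo] does)
def url_score_bsearch (w ul : String) (lo hi : Int) : Int :=
  if h : lo < hi then
    let mid := PySem.Int.floordiv (lo + hi + 1) 2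
    if PySem.Str.isIn (PySem.Str.slice w none (some mid)) ul then
      url_score_bsearch w ul mid hi
    else
      url_score_bsearch w ul lo (mid - 1)
  else lo
termination_by (hi - lo).toNat
decreasing_by
  · have := pvMidBounds h; omega
  · have := pvMidBounds h; omega

def url_score_alt (query : String) (url : String) : Int :=
  let ul := PySem.Str.lower url
  let query_ws := PySem.Str.split₀ (PySem.Str.lower query)
  let score := query_ws.foldl (fun acc w =>
    if 3 < PySem.Str.len w then
      if PySem.Str.isIn (PySem.Str.slice w none (some 3)) ul then
        acc + (url_score_bsearch w ul 3 (PySem.Str.len w) - 2)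
      else acc
    else
      if PySem.Str.isIn w ul then acc + 1 else acc) 0
  if (query_ws.length : Int) < score then score else 0

-- ===== PRECONDITION & SPEC =====
def Spec_url_score (query : String) (url : String) (out : Int) : Prop := out = url_score_alt query url
instance (query : String) (url : String) (out : Int) : Decidable (Spec_url_score query url out) := by unfold Spec_url_score; infer_instance

-- ===== CLAIM (what is proved, stated in full; the proofs are below) =====
def Claim_equal_url_score : Prop := ∀ (query : String) (url : String), Dom_url_score query url → Spec_url_score query url (url_score query url)

-- ===== LEMMAS AND PROOFS =====

-- prefix presence in ul is monotone: if w[:j] occurs, so does the shorter w[:i]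
lemma pvPrefixMono (w ul : String) {i j : Int} (h0 : 0 ≤ i) (hij : i ≤ j)
    (h : PySem.Str.isIn (PySem.Str.slice w none (some j)) ul = true) :
    PySem.Str.isIn (PySem.Str.slice w none (some i)) ul = true := by
  rw [PySem.Str.isIn_iff_infix, PySem.Str.toList_slice, PySem.Chars.slice_eq_listSlice,
    PySem.List.slice_to _ (le_trans h0 hij)] at h
  rw [PySem.Str.isIn_iff_infix, PySem.Str.toList_slice, PySem.Chars.slice_eq_listSlice,
    PySem.List.slice_to _ h0]
  have hE : List.take i.toNat w.toList = List.take i.toNat (List.take j.toNat w.toList) := by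
    rw [List.take_take]; congr 1; omega
  rw [hE]
  exact (List.take_prefix _ _).isInfix.trans h

lemma pvCountAllFalse (P : Int → Bool) (a b : Int)
    (h : ∀ j, a ≤ j → j < b → P j = false) :
    List.countP P (PySem.List.pyRange a b) = 0 := by
  rw [List.countP_eq_zero]
  intro j hj
  rw [PySem.List.mem_pyRange_one] at hj
  simp [h j hj.1 hj.2]

-- counting a downward-closed predicate over range(a, b): the count is r - a + 1
lemma pvCountLe (P : Int → Bool) : ∀ (k : Nat) (a b r : Int), (r + 1 - a).toNat = k → a ≤ r → r < b →
    (∀ j, a ≤ j → j < b → (P j = true ↔ j ≤ r)) →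
    (List.countP P (PySem.List.pyRange a b) : Int) = r - a + 1 := by
  intro k
  induction k with
  | zero => intro a b r hk har _ _; omega
  | succ k ih =>
    intro a b r hk har hrb hiff
    rw [PySem.List.pyRange_one_cons (lt_of_le_of_lt har hrb), List.countP_cons]
    have hPa : P a = true := (hiff a le_rfl (lt_of_le_of_lt har hrb)).2 har
    rcases lt_or_eq_of_le har with hlt | heq
    · have hrec := ih (a + 1) b r (by omega) (by omega) hrb (fun j hj hj2 => hiff j (by omega) hj2)
      simp only [hPa, if_true]
      push_cast
      push_cast at hrec
      omega
    · have h0 : List.countP P (PySem.List.pyRange (a + 1) b) = 0 := by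
        apply pvCountAllFalse
        intro j hj1 hj2
        cases hpj : P j with
        | false => rfl
        | true => exact absurd ((hiff j (by omega) hj2).1 hpj) (by omega)
      simp only [h0, hPa, if_true]
      push_cast
      omega

-- the binary search finds the largest j ≤ hi whose prefix occurs, given that lo's does
lemma pvBsearchSpec (w ul : String) (n : Int) : ∀ (k : Nat) (lo hi : Int), (hi - lo).toNat ≤ k →
    0 ≤ lo → lo ≤ hi →
    PySem.Str.isIn (PySem.Str.slice w none (some lo)) ul = true →
    (∀ j, hi < j → j ≤ n → PySem.Str.isIn (PySem.Str.slice w none (some j)) ul = false) →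
    lo ≤ url_score_bsearch w ul lo hi ∧ url_score_bsearch w ul lo hi ≤ hi ∧
    PySem.Str.isIn (PySem.Str.slice w none (some (url_score_bsearch w ul lo hi))) ul = true ∧
    (∀ j, url_score_bsearch w ul lo hi < j → j ≤ n →
      PySem.Str.isIn (PySem.Str.slice w none (some j)) ul = false) := by
  intro k
  induction k with
  | zero =>
    intro lo hi hk h0 hle hP hhi
    rw [url_score_bsearch, dif_neg (by omega : ¬ lo < hi)]
    have hEq : lo = hi := by omega
    subst hEq
    exact ⟨le_rfl, le_rfl, hP, hhi⟩
  | succ k ih =>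
    intro lo hi hk h0 hle hP hhi
    rw [url_score_bsearch]
    by_cases hlh : lo < hi
    · rw [dif_pos hlh]
      have hmid := pvMidBounds hlh
      cases hPm : PySem.Str.isIn (PySem.Str.slice w none (some (PySem.Int.floordiv (lo + hi + 1) 2))) ul with
      | true =>
        simp only [hPm, if_true]
        obtain ⟨a1, a2, a3, a4⟩ := ih (PySem.Int.floordiv (lo + hi + 1) 2) hi
          (by omega) (by omega) (by omega) hPm hhi
        exact ⟨by omega, a2, a3, a4⟩
      | false =>
        simp only [hPm, Bool.false_eq_true, if_false]
        have hhi' : ∀ j, PySem.Int.floordiv (lo + hi + 1) 2 - 1 < j → j ≤ n →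
            PySem.Str.isIn (PySem.Str.slice w none (some j)) ul = false := by
          intro j hj1 hj2
          cases hpj : PySem.Str.isIn (PySem.Str.slice w none (some j)) ul with
          | false => rfl
          | true =>
            by_cases hjh : j ≤ hi
            · exact absurd
                (pvPrefixMono w ul (by omega)
                  (by omega : PySem.Int.floordiv (lo + hi + 1) 2 ≤ j) hpj)
                (by rw [hPm]; exact Bool.false_ne_true)
            · exact absurd (hhi j (by omega) hj2) (by rw [hpj]; exact Bool.noConfusion)
        obtain ⟨a1, a2, a3, a4⟩ := ih lo (PySem.Int.floordiv (lo + hi + 1) 2 - 1)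
          (by omega) h0 (by omega) hP hhi'
        exact ⟨a1, by omega, a3, a4⟩
    · rw [dif_neg hlh]
      have hEq : lo = hi := by omega
      subst hEq
      exact ⟨le_rfl, le_rfl, hP, hhi⟩

-- per-word scores agree
lemma pvWordEq (ul w : String) :
    (if 3 < PySem.Str.len w then
      ((PySem.List.pyRange 3 (PySem.Str.len w + 1)).countP
        (fun j => PySem.Str.isIn (PySem.Str.slice w none (some j)) ul) : Int)
    else if PySem.Str.isIn w ul then 1 else 0)
    = (if 3 < PySem.Str.len w then
        (if PySem.Str.isIn (PySem.Str.slice w none (some 3)) ul then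
          url_score_bsearch w ul 3 (PySem.Str.len w) - 2
        else 0)
      else if PySem.Str.isIn w ul then 1 else 0) := by
  by_cases hlen : 3 < PySem.Str.len w
  · rw [if_pos hlen, if_pos hlen]
    cases hP3 : PySem.Str.isIn (PySem.Str.slice w none (some 3)) ul with
    | false =>
      simp only [Bool.false_eq_true, if_false]
      have h0 : List.countP (fun j => PySem.Str.isIn (PySem.Str.slice w none (some j)) ul)
          (PySem.List.pyRange 3 (PySem.Str.len w + 1)) = 0 := by
        apply pvCountAllFalse
        intro j hj1 _
        cases hpj : PySem.Str.isIn (PySem.Str.slice w none (some j)) ul with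
        | false => rfl
        | true =>
          exact absurd (pvPrefixMono w ul (by omega) hj1 hpj)
            (by rw [hP3]; exact Bool.false_ne_true)
      rw [h0]
      simp
    | true =>
      simp only [if_true]
      obtain ⟨hr1, hr2, hr3, hr4⟩ := pvBsearchSpec w ul (PySem.Str.len w)
        ((PySem.Str.len w - 3).toNat) 3 (PySem.Str.len w) le_rfl (by omega) (by omega) hP3
        (fun j hj1 hj2 => absurd hj2 (by omega))
      have hiff : ∀ j, (3:Int) ≤ j → j < PySem.Str.len w + 1 →
          (PySem.Str.isIn (PySem.Str.slice w none (some j)) ul = true ↔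
            j ≤ url_score_bsearch w ul 3 (PySem.Str.len w)) := by
        intro j hj1 hj2
        constructor
        · intro hpj
          by_contra hgt
          exact absurd (hr4 j (by omega) (by omega)) (by rw [hpj]; exact Bool.noConfusion)
        · intro hjr
          exact pvPrefixMono w ul (by omega) hjr hr3
      have hc := pvCountLe (fun j => PySem.Str.isIn (PySem.Str.slice w none (some j)) ul)
        ((url_score_bsearch w ul 3 (PySem.Str.len w) + 1 - 3).toNat) 3 (PySem.Str.len w + 1)
        (url_score_bsearch w ul 3 (PySem.Str.len w)) rfl hr1 (by omega) hiff
      rw [hc]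
      omega
  · rw [if_neg hlen, if_neg hlen]

-- the two word loops compute the same total
lemma pvFoldEq (ws : List String) (ul : String) :
    ws.foldl (fun acc w =>
      if 3 < PySem.Str.len w then
        (PySem.List.pyRange 3 (PySem.Str.len w + 1)).foldl (fun acc2 j =>
          if PySem.Str.isIn (PySem.Str.slice w none (some j)) ul then acc2 + 1 else acc2) acc
      else
        if PySem.Str.isIn w ul then acc + 1 else acc) 0
    = ws.foldl (fun acc w =>
      if 3 < PySem.Str.len w then
        if PySem.Str.isIn (PySem.Str.slice w none (some 3)) ul then
          acc + (url_score_bsearch w ul 3 (PySem.Str.len w) - 2)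
        else acc
      else
        if PySem.Str.isIn w ul then acc + 1 else acc) 0 := by
  have hA : (fun (acc : Int) (w : String) =>
      if 3 < PySem.Str.len w then
        (PySem.List.pyRange 3 (PySem.Str.len w + 1)).foldl (fun acc2 j =>
          if PySem.Str.isIn (PySem.Str.slice w none (some j)) ul then acc2 + 1 else acc2) acc
      else
        if PySem.Str.isIn w ul then acc + 1 else acc)
      = fun acc w => acc + (if 3 < PySem.Str.len w then
          ((PySem.List.pyRange 3 (PySem.Str.len w + 1)).countP
            (fun j => PySem.Str.isIn (PySem.Str.slice w none (some j)) ul) : Int)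
        else if PySem.Str.isIn w ul then 1 else 0) := by
    funext acc w
    by_cases hlen : 3 < PySem.Str.len w
    · rw [if_pos hlen, if_pos hlen, PySem.List.foldl_if_add_one]
    · rw [if_neg hlen, if_neg hlen]
      split_ifs <;> omega
  have hB : (fun (acc : Int) (w : String) =>
      if 3 < PySem.Str.len w then
        if PySem.Str.isIn (PySem.Str.slice w none (some 3)) ul then
          acc + (url_score_bsearch w ul 3 (PySem.Str.len w) - 2)
        else acc
      else
        if PySem.Str.isIn w ul then acc + 1 else acc)
      = fun acc w => acc + (if 3 < PySem.Str.len w then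
          (if PySem.Str.isIn (PySem.Str.slice w none (some 3)) ul then
            url_score_bsearch w ul 3 (PySem.Str.len w) - 2
          else 0)
        else if PySem.Str.isIn w ul then 1 else 0) := by
    funext acc w
    split_ifs <;> omega
  rw [hA, hB, PySem.List.foldl_add, PySem.List.foldl_add]
  congr 1
  congr 1
  exact List.map_congr_left (fun w _ => pvWordEq ul w)

-- ===== VERDICT (by name: the statement is the Claim_ definition above) =====
theorem url_score_spec : Claim_equal_url_score := by
  intro query url _
  show url_score query url = url_score_alt query url
  unfold url_score url_score_alt
  simp only [pvFoldEq]
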